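-- pv_equiv track=rewrite | github.com/MatiasVereecke/Algorithms_Vives_exercises_test | exercise2.py | sumOfEvenLucasNumbers
-- ===== SOURCE A (Python) =====
-- def sumOfEvenLucasNumbers(n):
--   current = 1
--   sum = 2
--   while current < n:
--     nextNumber = luc(current)
--     if nextNumber % 2 ==0:
--       sum += nextNumber
--
--     current +=1
--   return sum
--
-- def luc(n):
--   if n == 0:
--     return 2
--   elif n ==1:
--     return 1
--   else:
--     return luc(n-1) + luc(n-2)
-- ===== SOURCE B (Python) =====
-- def sumOfEvenLucasNumbers(n):
--     # Iterate Lucas numbers linearly (a = L(k), b = L(k+1)) instead of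
--     # recomputing each one with exponential recursion.
--     total = 2
--     a, b = 1, 3  # L(1), L(2)
--     k = 1
--     while k < n:
--         if a % 2 == 0:
--             total += a
--         a, b = b, a + b
--         k += 1
--     return total
-- ===== Notes on version B (the rewrite author's own statement) =====
-- stated objective: faster
-- what changed: replaces the naive exponential recursive Lucas computation inside the loop with a single linear pass that carries the consecutive Lucas pair (a,b) and a running sum; intended as faster: a timing run observed A timing out on moderate n where B returned
import Mathlib
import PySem

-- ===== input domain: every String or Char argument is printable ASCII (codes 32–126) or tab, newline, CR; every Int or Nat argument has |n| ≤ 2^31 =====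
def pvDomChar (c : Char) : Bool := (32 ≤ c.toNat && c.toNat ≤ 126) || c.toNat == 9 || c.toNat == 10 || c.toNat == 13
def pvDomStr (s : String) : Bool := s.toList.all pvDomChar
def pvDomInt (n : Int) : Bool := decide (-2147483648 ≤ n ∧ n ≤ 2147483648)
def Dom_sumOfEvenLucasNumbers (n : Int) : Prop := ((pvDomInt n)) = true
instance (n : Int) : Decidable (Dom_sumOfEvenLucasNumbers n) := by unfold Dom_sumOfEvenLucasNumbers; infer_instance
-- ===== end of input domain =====

-- B replaces A's exponential recursive Lucas computation inside the loop with a single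
-- linear pass carrying the consecutive Lucas pair and a running sum; intended as faster
-- (a timing run observed A timing out on moderate inputs where B returned).

-- ===== PORT A =====
-- recursive helper luc (Python's luc, on the nonnegative arguments A feeds it)
def lucA : Nat → Int
  | 0 => 2
  | 1 => 1
  | (k+2) => lucA (k+1) + lucA k

-- while current < n: nextNumber = luc(current); if even add; current += 1
def goA (n current sum : Int) : Int :=
  if current < n then
    let nextNumber := lucA current.toNat
    goA n (current + 1) (if nextNumber % 2 == 0 then sum + nextNumber else sum)
  else sum
termination_by (n - current).toNat
decreasing_by omega

def sumOfEvenLucasNumbers (n : Int) : Int := goA n 1 2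

-- ===== PORT B =====
-- while k < n: if a even add to total; (a, b) = (b, a+b); k += 1
def goB (n k a b total : Int) : Int :=
  if k < n then
    goB n (k + 1) b (a + b) (if a % 2 == 0 then total + a else total)
  else total
termination_by (n - k).toNat
decreasing_by omega

def sumOfEvenLucasNumbers_alt (n : Int) : Int := goB n 1 1 3 2

-- ===== PRECONDITION & SPEC =====
def Spec_sumOfEvenLucasNumbers (n : Int) (out : Int) : Prop := out = sumOfEvenLucasNumbers_alt n
instance (n : Int) (out : Int) : Decidable (Spec_sumOfEvenLucasNumbers n out) := by unfold Spec_sumOfEvenLucasNumbers; infer_instance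

-- ===== CLAIM (what is proved, stated in full; the proofs are below) =====
def Claim_equal_sumOfEvenLucasNumbers : Prop := ∀ (n : Int), Dom_sumOfEvenLucasNumbers n → Spec_sumOfEvenLucasNumbers n (sumOfEvenLucasNumbers n)

-- ===== LEMMAS AND PROOFS =====

-- invariant: B's pair (a,b) is (luc c, luc (c+1)), so both loops carry the same sum
theorem goA_eq_goB (t : Nat) : ∀ (n c s : Int), (n - c).toNat = t → 0 ≤ c →
    goA n c s = goB n c (lucA c.toNat) (lucA (c.toNat + 1)) s := by
  induction t with
  | zero =>
    intro n c s ht hc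
    have h : ¬ c < n := by omega
    rw [goA, goB]
    simp [h]
  | succ t ih =>
    intro n c s ht hc
    rw [goA, goB]
    by_cases h : c < n
    · simp only [h, if_pos]
      have h1 : (c + 1).toNat = c.toNat + 1 := by omega
      have h2 : (n - (c + 1)).toNat = t := by omega
      have := ih n (c + 1) (if lucA c.toNat % 2 == 0 then s + lucA c.toNat else s) h2 (by omega)
      rw [this, h1]
      have h3 : lucA (c.toNat + 1 + 1) = lucA (c.toNat + 1) + lucA c.toNat := rfl
      rw [h3]
      ring_nf
    · simp [h]

-- ===== VERDICT (by name: the statement is the Claim_ definition above) =====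
theorem sumOfEvenLucasNumbers_spec : Claim_equal_sumOfEvenLucasNumbers := by
  intro n _
  unfold Spec_sumOfEvenLucasNumbers sumOfEvenLucasNumbers sumOfEvenLucasNumbers_alt
  have := goA_eq_goB (n - 1).toNat n 1 2 rfl (by omega)
  simpa using this
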